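-- pv_equiv track=rewrite | github.com/Ernyoke/codeforces-py | build_the_permutation.py | solve
-- ===== SOURCE A (Python) =====
-- def solve(n, a, b):
--     if abs(a - b) > 1 or n - a - b < 2:
--         return [-1]
--     res = [i for i in range(1, n + 1)]
--     if a > b:
--         for i in range(0, 2 * a, 2):
--             res[n - i - 1], res[n - i - 2] = res[n - i - 2], res[n - i - 1]
--     elif b > a:
--         for i in range(0, 2 * b, 2):
--             res[i], res[i + 1] = res[i + 1], res[i]
--     elif a == b:
--         for i in range(0, 2 * a, 2):
--             res[i + 1], res[i + 2] = res[i + 2], res[i + 1]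
--     return res
-- ===== SOURCE B (Python) =====
-- def solve(n, a, b):
--     if abs(a - b) > 1 or n - a - b < 2:
--         return [-1]
--     m = max(a, b)
--     if m <= 0:
--         return list(range(1, n + 1))
--     off = 0 if b > a else (1 if a == b else n - 2 * a)
--     head = list(range(1, off + 1))
--     pairs = [p for k in range(m) for p in (off + 2 * k + 2, off + 2 * k + 1)]
--     tail = list(range(off + 2 * m + 1, n + 1))
--     return head + pairs + tail
-- ===== Notes on version B (the rewrite author's own statement) =====
-- stated objective: simpler
-- what changed: B builds the answer directly as head ++ swapped-pair block ++ identity tail instead of A's in-place adjacent swaps on a mutable identity list.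
import Mathlib
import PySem

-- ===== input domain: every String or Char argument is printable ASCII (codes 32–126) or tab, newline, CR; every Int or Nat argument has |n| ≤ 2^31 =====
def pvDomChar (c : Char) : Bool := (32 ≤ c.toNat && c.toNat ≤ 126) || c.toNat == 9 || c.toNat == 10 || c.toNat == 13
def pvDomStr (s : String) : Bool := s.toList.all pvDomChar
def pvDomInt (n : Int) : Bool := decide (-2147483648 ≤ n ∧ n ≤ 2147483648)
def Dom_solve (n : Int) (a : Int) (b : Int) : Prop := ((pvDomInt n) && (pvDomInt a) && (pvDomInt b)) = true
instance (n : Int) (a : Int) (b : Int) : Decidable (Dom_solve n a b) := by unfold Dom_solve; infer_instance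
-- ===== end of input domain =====

-- B replaces A's in-place pair-swapping on an identity list by directly emitting
-- head ++ swapped-pair block ++ identity tail (objective: simpler, same cost).

-- ===== PORT A =====
-- models Python's 'r[i], r[j] = r[j], r[i]'; whenever A executes it the indices are in
-- range, where pyGetD/pySetD agree exactly with Python's r[i] / r[i] = v
def pySwap2 (r : List Int) (i j : Int) : List Int :=
  let vi := PySem.List.pyGetD r j 0
  let vj := PySem.List.pyGetD r i 0
  PySem.List.pySetD (PySem.List.pySetD r i vi) j vj

def solve (n : Int) (a : Int) (b : Int) : List Int :=
  if |a - b| > 1 ∨ n - a - b < 2 then [-1]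
  else
    let res := PySem.List.pyRange 1 (n + 1) 1
    if a > b then
      (PySem.List.pyRange 0 (2 * a) 2).foldl (fun r i => pySwap2 r (n - i - 1) (n - i - 2)) res
    else if b > a then
      (PySem.List.pyRange 0 (2 * b) 2).foldl (fun r i => pySwap2 r i (i + 1)) res
    else if a = b then
      (PySem.List.pyRange 0 (2 * a) 2).foldl (fun r i => pySwap2 r (i + 1) (i + 2)) res
    else res

-- ===== PORT B =====
def solve_alt (n : Int) (a : Int) (b : Int) : List Int :=
  if |a - b| > 1 ∨ n - a - b < 2 then [-1]
  else
    let m := max a b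
    if m ≤ 0 then PySem.List.pyRange 1 (n + 1) 1
    else
      let off := if b > a then 0 else if a = b then 1 else n - 2 * a
      PySem.List.pyRange 1 (off + 1) 1
        ++ (PySem.List.pyRange 0 m 1).flatMap (fun k => [off + 2 * k + 2, off + 2 * k + 1])
        ++ PySem.List.pyRange (off + 2 * m + 1) (n + 1) 1

-- ===== PRECONDITION & SPEC =====
def Spec_solve (n : Int) (a : Int) (b : Int) (out : List Int) : Prop := out = solve_alt n a b
instance (n : Int) (a : Int) (b : Int) (out : List Int) : Decidable (Spec_solve n a b out) := by unfold Spec_solve; infer_instance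

-- ===== CLAIM (what is proved, stated in full; the proofs are below) =====
def Claim_equal_solve : Prop := ∀ (n : Int) (a : Int) (b : Int), Dom_solve n a b → Spec_solve n a b (solve n a b)

-- ===== LEMMAS AND PROOFS =====

theorem length_pySwap2 (r : List Int) (i j : Int) :
    (pySwap2 r i j).length = r.length := by
  simp [pySwap2, PySem.List.length_pySetD]

theorem pySwap2_base01 (x y : Int) (t : List Int) :
    pySwap2 (x :: y :: t) 0 1 = y :: x :: t := by
  simp [pySwap2, PySem.List.pyGetD_of_nonneg, PySem.List.pySetD_of_nonneg, List.getD]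

theorem pySwap2_base10 (x y : Int) (t : List Int) :
    pySwap2 (x :: y :: t) 1 0 = y :: x :: t := by
  simp [pySwap2, PySem.List.pyGetD_of_nonneg, PySem.List.pySetD_of_nonneg, List.getD]

theorem pySwap2_cons (u : Int) (l : List Int) (i j : Int) (hi : 0 ≤ i) (hj : 0 ≤ j) :
    pySwap2 (u :: l) (i + 1) (j + 1) = u :: pySwap2 l i j := by
  have hi1 : (0:Int) ≤ i + 1 := by omega
  have hj1 : (0:Int) ≤ j + 1 := by omega
  have hti : (i + 1).toNat = i.toNat + 1 := by omega
  have htj : (j + 1).toNat = j.toNat + 1 := by omega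
  simp [pySwap2, PySem.List.pyGetD_of_nonneg _ _ hi, PySem.List.pyGetD_of_nonneg _ _ hj,
        PySem.List.pyGetD_of_nonneg _ _ hi1, PySem.List.pyGetD_of_nonneg _ _ hj1,
        PySem.List.pySetD_of_nonneg _ _ hi, PySem.List.pySetD_of_nonneg _ _ hj,
        PySem.List.pySetD_of_nonneg _ _ hi1, PySem.List.pySetD_of_nonneg _ _ hj1,
        hti, htj, List.getD]

theorem pySwap2_prefix (l t : List Int) (i j : Int)
    (hi0 : 0 ≤ i) (hil : i < (l.length : Int)) (hj0 : 0 ≤ j) (hjl : j < (l.length : Int)) :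
    pySwap2 (l ++ t) i j = pySwap2 l i j ++ t := by
  have hiN : i.toNat < l.length := by omega
  have hjN : j.toNat < l.length := by omega
  simp [pySwap2, PySem.List.pyGetD_of_nonneg _ _ hi0, PySem.List.pyGetD_of_nonneg _ _ hj0,
        PySem.List.pySetD_of_nonneg _ _ hi0, PySem.List.pySetD_of_nonneg _ _ hj0,
        List.getElem?_append_left hiN, List.getElem?_append_left hjN,
        hiN, hjN]

theorem pySwap2_at_flip (l : List Int) (x y : Int) (t : List Int) :
    pySwap2 (l ++ x :: y :: t) ((l.length : Int) + 1) (l.length : Int) = l ++ y :: x :: t := by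
  induction l with
  | nil => simpa using pySwap2_base10 x y t
  | cons u l ih =>
      have h : ((u :: l).length : Int) = (l.length : Int) + 1 := by push_cast [List.length_cons]; ring
      rw [List.cons_append, h, pySwap2_cons u _ _ _ (by positivity) (by positivity), ih, List.cons_append]

-- folding swaps whose positions are all ≥ 1 leaves the head alone
theorem foldl_swap_cons (ks : List Nat) (g h : Nat → Int)
    (hg : ∀ k, 0 ≤ g k) (hh : ∀ k, 0 ≤ h k) (u : Int) :
    ∀ l : List Int,
      ks.foldl (fun r k => pySwap2 r (g k + 1) (h k + 1)) (u :: l)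
        = u :: ks.foldl (fun r k => pySwap2 r (g k) (h k)) l := by
  induction ks with
  | nil => intro l; simp
  | cons k ks ih =>
      intro l
      simp only [List.foldl_cons, pySwap2_cons u l (g k) (h k) (hg k) (hh k)]
      exact ih _

-- folding swaps whose positions all lie inside the prefix leaves the tail alone
theorem foldl_swap_prefix (ks : List Nat) (g h : Nat → Int) :
    ∀ (l t : List Int),
      (∀ k ∈ ks, 0 ≤ g k ∧ g k < (l.length : Int)) →
      (∀ k ∈ ks, 0 ≤ h k ∧ h k < (l.length : Int)) →
      ks.foldl (fun r k => pySwap2 r (g k) (h k)) (l ++ t)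
        = ks.foldl (fun r k => pySwap2 r (g k) (h k)) l ++ t := by
  induction ks with
  | nil => intro l t _ _; simp
  | cons k ks ih =>
      intro l t hg hh
      obtain ⟨hg0, hgl⟩ := hg k (by simp)
      obtain ⟨hh0, hhl⟩ := hh k (by simp)
      simp only [List.foldl_cons, pySwap2_prefix l t _ _ hg0 hgl hh0 hhl]
      have hlen : ((pySwap2 l (g k) (h k)).length : Int) = (l.length : Int) := by
        rw [length_pySwap2]
      exact ih _ _ (fun k' hk' => by rw [hlen]; exact hg k' (by simp [hk']))
                   (fun k' hk' => by rw [hlen]; exact hh k' (by simp [hk']))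

-- forward pair swaps at positions (2k, 2k+1) on a consecutive range
theorem loop_fwd (m : Nat) : ∀ (s t : Int), s + 2 * m ≤ t →
    (List.range m).foldl (fun (r : List Int) (k : Nat) => pySwap2 r (2 * (k : Int)) (2 * (k : Int) + 1))
        (PySem.List.pyRange s t 1)
      = (List.range m).flatMap (fun (k : Nat) => [s + 2 * (k : Int) + 1, s + 2 * (k : Int)])
          ++ PySem.List.pyRange (s + 2 * m) t 1 := by
  induction m with
  | zero => intro s t _; simp
  | succ m ih =>
      intro s t hst
      have h1 : s < t := by push_cast at hst ⊢; omega
      have h2 : s + 1 < t := by push_cast at hst ⊢; omega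
      rw [List.range_succ_eq_map]
      rw [PySem.List.pyRange_one_cons h1, PySem.List.pyRange_one_cons h2]
      rw [List.foldl_cons]
      simp only [Nat.cast_zero, mul_zero, zero_add]
      rw [pySwap2_base01 s (s + 1) (PySem.List.pyRange (s + 1 + 1) t 1), List.foldl_map]
      have hcongr : ∀ (init : List Int),
          (List.range m).foldl (fun (r : List Int) (k : Nat) => pySwap2 r (2 * ((Nat.succ k : Nat) : Int))
            (2 * ((Nat.succ k : Nat) : Int) + 1)) init
          = (List.range m).foldl
              (fun (r : List Int) (k : Nat) => pySwap2 r ((2 * (k : Int) + 1) + 1) ((2 * (k : Int) + 2) + 1)) init := by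
        intro init
        refine PySem.List.foldl_congr_mem _ _ _ _ ?_
        intro acc k _
        have : ((Nat.succ k : Nat) : Int) = (k : Int) + 1 := by push_cast; ring
        rw [this]; ring_nf
      rw [hcongr]
      rw [foldl_swap_cons _ _ _ (fun k => by positivity) (fun k => by positivity)]
      have hcongr2 : ∀ (init : List Int),
          (List.range m).foldl (fun (r : List Int) (k : Nat) => pySwap2 r (2 * (k : Int) + 1) (2 * (k : Int) + 2)) init
          = (List.range m).foldl
              (fun (r : List Int) (k : Nat) => pySwap2 r ((2 * (k : Int)) + 1) ((2 * (k : Int) + 1) + 1)) init := by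
        intro init
        refine PySem.List.foldl_congr_mem _ _ _ _ ?_
        intro acc k _; ring_nf
      rw [hcongr2, foldl_swap_cons _ _ _ (fun k => by positivity) (fun k => by positivity)]
      have hih := ih (s + 2) t (by push_cast at hst ⊢; omega)
      have hr : s + 1 + 1 = s + 2 := by ring
      rw [hr, hih]
      simp only [List.flatMap_cons, List.flatMap_map]
      have e1 : (fun k : Nat => [s + 2 * ((k.succ : Nat) : Int) + 1, s + 2 * ((k.succ : Nat) : Int)])
          = (fun k : Nat => [s + 2 + 2 * (k : Int) + 1, s + 2 + 2 * (k : Int)]) := by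
        funext k; push_cast; ring_nf
      have e2 : s + 2 * (((m + 1 : Nat)) : Int) = s + 2 + 2 * (m : Int) := by push_cast; ring
      simp only [e1, e2, Nat.cast_zero, mul_zero, add_zero]
      simp [List.cons_append]

-- backward pair swaps at positions (n-2k-1, n-2k-2) from the end of [1..n]
theorem loop_bwd (m : Nat) : ∀ (n : Int), 2 * m + 1 ≤ n →
    (List.range m).foldl
        (fun (r : List Int) (k : Nat) => pySwap2 r (n - 2 * (k : Int) - 1) (n - 2 * (k : Int) - 2))
        (PySem.List.pyRange 1 (n + 1) 1)
      = PySem.List.pyRange 1 (n - 2 * m + 1) 1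
          ++ (List.range m).flatMap
              (fun (k : Nat) => [n - 2 * m + 2 * (k : Int) + 2, n - 2 * m + 2 * (k : Int) + 1]) := by
  induction m with
  | zero => intro n _; norm_num
  | succ m ih =>
      intro n hn
      have hn' : 2 * (m : Int) + 3 ≤ n := by push_cast at hn; omega
      rw [List.range_succ_eq_map, List.foldl_cons]
      have d1 : PySem.List.pyRange 1 (n + 1) 1
          = PySem.List.pyRange 1 (n - 1) 1 ++ [n - 1, n] := by
        rw [PySem.List.pyRange_one_append 1 (n - 1) (n + 1) (by omega) (by omega)]
        congr 1
        rw [PySem.List.pyRange_one_cons (by omega : n - 1 < n + 1),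
            show n - 1 + 1 = n by ring,
            PySem.List.pyRange_one_cons (by omega : n < n + 1),
            PySem.List.pyRange_one_eq_nil (by omega : n + 1 ≤ n + 1)]
      have hlen : ((PySem.List.pyRange 1 (n - 1) 1).length : Int) = n - 2 := by
        rw [PySem.List.length_pyRange_one]; omega
      have hswap : pySwap2 (PySem.List.pyRange 1 (n - 1) 1 ++ [n - 1, n])
          (n - 2 * ((0 : Nat) : Int) - 1) (n - 2 * ((0 : Nat) : Int) - 2)
          = PySem.List.pyRange 1 (n - 1) 1 ++ [n, n - 1] := by
        have h0 := pySwap2_at_flip (PySem.List.pyRange 1 (n - 1) 1) (n - 1) n []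
        rw [hlen, show n - 2 + 1 = n - 1 by ring] at h0
        norm_num
        exact h0
      rw [d1, hswap, List.foldl_map]
      have hcongr : ∀ (init : List Int),
          (List.range m).foldl (fun (r : List Int) (k : Nat) =>
              pySwap2 r (n - 2 * ((Nat.succ k : Nat) : Int) - 1)
                        (n - 2 * ((Nat.succ k : Nat) : Int) - 2)) init
          = (List.range m).foldl (fun (r : List Int) (k : Nat) =>
              pySwap2 r (n - 2 - 2 * (k : Int) - 1) (n - 2 - 2 * (k : Int) - 2)) init := by
        intro init
        refine PySem.List.foldl_congr_mem _ _ _ _ ?_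
        intro acc k _
        have hk : ((Nat.succ k : Nat) : Int) = (k : Int) + 1 := by push_cast; ring
        rw [hk]; ring_nf
      rw [hcongr]
      rw [foldl_swap_prefix (List.range m)
            (fun k => n - 2 - 2 * (k : Int) - 1) (fun k => n - 2 - 2 * (k : Int) - 2)
            (PySem.List.pyRange 1 (n - 1) 1) [n, n - 1]
            (fun k hk => by
              have hk' : (k : Int) < (m : Int) := by exact_mod_cast List.mem_range.mp hk
              simp only [hlen]
              omega)
            (fun k hk => by
              have hk' : (k : Int) < (m : Int) := by exact_mod_cast List.mem_range.mp hk
              simp only [hlen]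
              omega)]
      have hih := ih (n - 2) (by omega)
      have hr2 : n - 2 + 1 = n - 1 := by ring
      rw [hr2] at hih
      rw [hih]
      rw [← List.range_succ_eq_map, List.range_succ, List.flatMap_append]
      have e1 : (fun (k : Nat) => [n - 2 * (((m + 1 : Nat)) : Int) + 2 * (k : Int) + 2,
            n - 2 * (((m + 1 : Nat)) : Int) + 2 * (k : Int) + 1])
          = (fun (k : Nat) => [n - 2 - 2 * (m : Int) + 2 * (k : Int) + 2,
            n - 2 - 2 * (m : Int) + 2 * (k : Int) + 1]) := by
        funext k; push_cast; ring_nf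
      have e2 : n - 2 * (((m + 1 : Nat)) : Int) + 1 = n - 2 - 2 * (m : Int) + 1 := by
        push_cast; ring
      rw [e1, e2]
      have e3 : (List.flatMap (fun (k : Nat) => [n - 2 - 2 * (m : Int) + 2 * (k : Int) + 2,
            n - 2 - 2 * (m : Int) + 2 * (k : Int) + 1]) [m])
          = [n, n - 1] := by
        simp only [List.flatMap_cons, List.flatMap_nil, List.append_nil,
          List.cons.injEq, and_true]
        constructor <;> ring_nf
      rw [e3]
      simp [List.append_assoc]

theorem range2_empty (x : Int) (hx : x ≤ 0) : PySem.List.pyRange 0 (2 * x) 2 = [] := by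
  rw [PySem.List.pyRange_of_pos _ _ (by norm_num : (0:Int) < 2), if_neg (by omega)]
  simp

theorem range2_conv (x : Int) (hx : 0 < x) :
    PySem.List.pyRange 0 (2 * x) 2 = (List.range x.toNat).map (fun (k : Nat) => 2 * (k : Int)) := by
  rw [PySem.List.pyRange_of_pos _ _ (by norm_num : (0:Int) < 2), if_pos (by omega)]
  have h : ((2 * x - 0 + 2 - 1) / 2).toNat = x.toNat := by omega
  rw [h]
  simp only [zero_add]

theorem range1_conv (x : Int) (hx : 0 ≤ x) :
    PySem.List.pyRange 0 x 1 = (List.range x.toNat).map (fun (k : Nat) => (k : Int)) := by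
  conv_lhs => rw [show x = ((x.toNat : Nat) : Int) by omega]
  rw [PySem.List.pyRange_zero_natCast]

-- ===== VERDICT (by name: the statement is the Claim_ definition above) =====
theorem solve_spec : Claim_equal_solve := by
  intro n a b _
  unfold Spec_solve solve solve_alt
  by_cases hg : |a - b| > 1 ∨ n - a - b < 2
  · rw [if_pos hg, if_pos hg]
  · rw [if_neg hg, if_neg hg]
    push_neg at hg
    obtain ⟨h1, h2⟩ := hg
    have habs := abs_le.mp (le_of_not_gt (by omega : ¬ (1:Int) < |a - b|))
    rcases lt_trichotomy a b with hab | hab | hab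
    · -- a < b, so b = a + 1
      have hba : b = a + 1 := by omega
      rw [if_neg (by omega : ¬ a > b), if_pos hab]
      have hm : max a b = b := max_eq_right (le_of_lt hab)
      simp only [hm]
      by_cases hb : b ≤ 0
      · rw [range2_empty b hb, if_pos hb]
        simp
      · push_neg at hb
        rw [if_neg (by omega : ¬ b ≤ 0)]
        rw [if_pos hab]
        have hbn : ((b.toNat : Nat) : Int) = b := by omega
        rw [range2_conv b hb]
        simp only [List.foldl_map]
        have hfwd := loop_fwd b.toNat 1 (n + 1) (by omega)
        rw [hfwd]
        rw [range1_conv b (by omega), List.flatMap_map]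
        rw [PySem.List.pyRange_one_eq_nil (by norm_num : (0:Int) + 1 ≤ 1)]
        have ef : (fun (k : Nat) => [(0:Int) + 2 * (k:Int) + 2, 0 + 2 * (k:Int) + 1])
            = (fun (k : Nat) => [(1:Int) + 2 * (k:Int) + 1, 1 + 2 * (k:Int)]) := by
          funext k; norm_num; omega
        have et : (0:Int) + 2 * b + 1 = 1 + 2 * ((b.toNat : Nat) : Int) := by omega
        simp only [ef, et, List.nil_append, hbn]
    · -- a = b
      rw [if_neg (by omega : ¬ a > b), if_neg (by omega : ¬ b > a), if_pos hab]
      have hm : max a b = a := by omega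
      simp only [hm]
      by_cases ha : a ≤ 0
      · rw [range2_empty a ha, if_pos ha]
        simp
      · push_neg at ha
        rw [if_neg (by omega : ¬ a ≤ 0)]
        rw [if_neg (by omega : ¬ b > a), if_pos hab]
        have han : ((a.toNat : Nat) : Int) = a := by omega
        rw [range2_conv a ha]
        simp only [List.foldl_map]
        -- peel the fixed head 1
        rw [PySem.List.pyRange_one_cons (by omega : (1:Int) < n + 1)]
        have hcongr : ∀ (init : List Int),
            (List.range a.toNat).foldl (fun (r : List Int) (k : Nat) =>
                pySwap2 r (2 * (k : Int) + 1) (2 * (k : Int) + 2)) init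
            = (List.range a.toNat).foldl (fun (r : List Int) (k : Nat) =>
                pySwap2 r ((2 * (k : Int)) + 1) ((2 * (k : Int) + 1) + 1)) init := by
          intro init
          refine PySem.List.foldl_congr_mem _ _ _ _ ?_
          intro acc k _; ring_nf
        rw [hcongr, foldl_swap_cons _ _ _ (fun k => by positivity) (fun k => by positivity)]
        have hfwd := loop_fwd a.toNat (1 + 1) (n + 1) (by omega)
        rw [hfwd]
        rw [range1_conv a (by omega), List.flatMap_map]
        -- head of B is [1]
        rw [PySem.List.pyRange_one_cons (by norm_num : (1:Int) < 1 + 1),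
            PySem.List.pyRange_one_eq_nil (by norm_num : (1:Int) + 1 ≤ 1 + 1)]
        have ef : (fun (k : Nat) => [(1:Int) + 2 * (k:Int) + 2, 1 + 2 * (k:Int) + 1])
            = (fun (k : Nat) => [(1:Int) + 1 + 2 * (k:Int) + 1, 1 + 1 + 2 * (k:Int)]) := by
          funext k; norm_num; omega
        have et : (1:Int) + 2 * a + 1 = 1 + 1 + 2 * ((a.toNat : Nat) : Int) := by omega
        simp only [ef, et, List.cons_append, List.nil_append, han]
    · -- b < a, so b = a - 1
      rw [if_pos hab]
      have hm : max a b = a := by omega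
      simp only [hm]
      by_cases ha : a ≤ 0
      · rw [range2_empty a ha, if_pos ha]
        simp
      · push_neg at ha
        rw [if_neg (by omega : ¬ a ≤ 0)]
        rw [if_neg (by omega : ¬ b > a), if_neg (by omega : ¬ a = b)]
        have han : ((a.toNat : Nat) : Int) = a := by omega
        rw [range2_conv a ha]
        simp only [List.foldl_map]
        have hbwd := loop_bwd a.toNat n (by omega)
        rw [hbwd]
        rw [range1_conv a (by omega), List.flatMap_map]
        rw [PySem.List.pyRange_one_eq_nil (by omega : n + 1 ≤ n - 2 * a + 2 * a + 1)]
        have ef : (fun (k : Nat) => [n - 2 * a + 2 * (k:Int) + 2, n - 2 * a + 2 * (k:Int) + 1])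
            = (fun (k : Nat) => [n - 2 * ((a.toNat : Nat) : Int) + 2 * (k:Int) + 2,
                n - 2 * ((a.toNat : Nat) : Int) + 2 * (k:Int) + 1]) := by
          funext k; rw [han]
        have et : n - 2 * a + 1 = n - 2 * ((a.toNat : Nat) : Int) + 1 := by omega
        simp only [ef, et, List.append_nil, han]
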